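-- pv_equiv track=rewrite | github.com/a-bit-thinker/openquestions | math_proofs/steiner_system.py | _divisibility_failures
-- ===== SOURCE A (Python) =====
-- from math import comb
--
-- def _divisibility_failures(n: int, q: int, r: int) -> list[dict[str, int]]:
--     failures: list[dict[str, int]] = []
--     for check in _admissibility_checks(n, q, r):
--         if check["remainder"] != 0:
--             failures.append(
--                 {
--                     "s": check["i"],
--                     "i": check["i"],
--                     "numerator": check["numerator"],
--                     "denominator": check["denominator"],
--                     "remainder": check["remainder"],
--                 }
--             )
--     return failures
--
-- def _admissibility_checks(n: int, q: int, r: int) -> list[dict[str, int | None]]: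
--     checks: list[dict[str, int | None]] = []
--     for i in range(r):
--         numerator = comb(n - i, r - i)
--         denominator = comb(q - i, r - i)
--         remainder = numerator % denominator
--         quotient = numerator // denominator if remainder == 0 else None
--         checks.append(
--             {
--                 "i": i,
--                 "numerator": numerator,
--                 "denominator": denominator,
--                 "remainder": remainder,
--                 "quotient": quotient,
--             }
--         )
--     return checks
-- ===== SOURCE B (Python) =====
-- def _divisibility_failures(n: int, q: int, r: int) -> list[dict[str, int]]:
--     # Single descending pass: maintain comb(n-i, r-i) and comb(q-i, r-i)
--     # incrementally via the exact recurrence C(m, k) = C(m-1, k-1) * m // k,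
--     # instead of recomputing each binomial from scratch at every index.
--     failures = []
--     num = 1  # comb(n - r, 0)
--     den = 1  # comb(q - r, 0)
--     for i in reversed(range(r)):
--         k = r - i
--         num = num * (n - i) // k
--         den = den * (q - i) // k
--         rem = num % den
--         if rem != 0:
--             failures.append(
--                 {
--                     "s": i,
--                     "i": i,
--                     "numerator": num,
--                     "denominator": den,
--                     "remainder": rem,
--                 }
--             )
--     failures.reverse()
--     return failures
-- ===== Notes on version B (the rewrite author's own statement) =====
-- stated objective: faster
-- what changed: Instead of recomputing comb(n-i,r-i) and comb(q-i,r-i) from scratch with math.comb at every index, B makes one descending pass that updates both binomials with the exact recurrence C(m,k) = C(m-1,k-1)*m//k and builds the failure list back-to-front, reversing once at the end.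
import Mathlib
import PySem

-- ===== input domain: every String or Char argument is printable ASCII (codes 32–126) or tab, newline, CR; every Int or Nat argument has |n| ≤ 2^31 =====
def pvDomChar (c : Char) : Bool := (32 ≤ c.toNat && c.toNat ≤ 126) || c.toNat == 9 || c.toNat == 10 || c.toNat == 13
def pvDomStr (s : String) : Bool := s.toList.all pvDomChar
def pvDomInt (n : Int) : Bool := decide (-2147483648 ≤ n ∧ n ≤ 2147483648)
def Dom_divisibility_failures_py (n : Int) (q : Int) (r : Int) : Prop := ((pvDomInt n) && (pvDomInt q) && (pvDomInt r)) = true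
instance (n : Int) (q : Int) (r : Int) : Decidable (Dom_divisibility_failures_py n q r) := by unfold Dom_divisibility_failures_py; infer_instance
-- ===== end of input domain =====

-- B replaces A's per-index from-scratch binomials (math.comb at every i) by one descending
-- pass updating both binomials with the exact recurrence C(m,k) = C(m-1,k-1)*m//k.

-- ===== PORT A =====
-- math.comb(a, b); exact for 0 ≤ a, 0 ≤ b (Python raises ValueError on negative
-- arguments — all such calls are excluded by Pre_ below).
def pvIntComb (a b : Int) : Int := ((a.toNat).choose (b.toNat) : Int)

-- port of the helper _admissibility_checks
def pvChecks (n : Int) (q : Int) (r : Int) : List (PySem.Dict String (Option Int)) :=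
  (PySem.List.pyRange 0 r 1).foldl (fun checks i =>
    let numerator := pvIntComb (n - i) (r - i)
    let denominator := pvIntComb (q - i) (r - i)
    -- numerator % denominator: Python raises ZeroDivisionError when denominator = 0 (excluded by Pre_)
    let remainder := PySem.Int.mod numerator denominator
    let quotient : Option Int :=
      if remainder = 0 then some (PySem.Int.floordiv numerator denominator) else none
    checks ++ [PySem.Dict.mk [("i", some i), ("numerator", some numerator),
      ("denominator", some denominator), ("remainder", some remainder), ("quotient", quotient)]]) []

-- check[k], where in A's dicts the key is always present and holds an int (never None)
def pvField (d : PySem.Dict String (Option Int)) (k : String) : Int :=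
  (PySem.Dict.getD d k none).getD 0

def divisibility_failures_py (n : Int) (q : Int) (r : Int) : List (List (String × Int)) :=
  (pvChecks n q r).foldl (fun failures check =>
    if PySem.Dict.getD check "remainder" none ≠ some 0 then
      failures ++ [[("s", pvField check "i"), ("i", pvField check "i"),
        ("numerator", pvField check "numerator"), ("denominator", pvField check "denominator"),
        ("remainder", pvField check "remainder")]]
    else failures) []

-- ===== PORT B =====
-- one step of B's descending loop, carrying (num, den, failures-in-descending-i-order)
def pvStepB (n : Int) (q : Int) (r : Int)
    (st : Int × Int × List (List (String × Int))) (i : Int) :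
    Int × Int × List (List (String × Int)) :=
  let k := r - i
  let num := PySem.Int.floordiv (st.1 * (n - i)) k
  let den := PySem.Int.floordiv (st.2.1 * (q - i)) k
  let rem := PySem.Int.mod num den
  (num, den,
    if rem ≠ 0 then
      st.2.2 ++ [[("s", i), ("i", i), ("numerator", num), ("denominator", den), ("remainder", rem)]]
    else st.2.2)

def divisibility_failures_py_alt (n : Int) (q : Int) (r : Int) : List (List (String × Int)) :=
  -- for i in reversed(range(r)): …   then failures.reverse()
  ((((PySem.List.pyRange 0 r 1).reverse).foldl (pvStepB n q r) (1, 1, [])).2.2).reverse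

-- ===== PRECONDITION & SPEC =====
-- Pre_ is exactly the set of inputs on which A returns: for r > 0, math.comb raises
-- ValueError (negative argument) unless r - 1 ≤ n, and '%' raises ZeroDivisionError
-- unless r ≤ q (then comb(q-i, r-i) = 0 at some i); for r ≤ 0 the loop is empty.
def Pre_divisibility_failures_py (n : Int) (q : Int) (r : Int) : Prop :=
  r ≤ 0 ∨ (r - 1 ≤ n ∧ r ≤ q)
instance (n : Int) (q : Int) (r : Int) : Decidable (Pre_divisibility_failures_py n q r) := by
  unfold Pre_divisibility_failures_py; infer_instance

def pvWitness_divisibility_failures_py : Int × Int × Int := (13, 3, 2)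

def Spec_divisibility_failures_py (n : Int) (q : Int) (r : Int) (out : List (List (String × Int))) : Prop := out = divisibility_failures_py_alt n q r
instance (n : Int) (q : Int) (r : Int) (out : List (List (String × Int))) : Decidable (Spec_divisibility_failures_py n q r out) := by unfold Spec_divisibility_failures_py; infer_instance

-- ===== CLAIM (what is proved, stated in full; the proofs are below) =====
def Claim_equal_divisibility_failures_py : Prop := ∀ (n : Int) (q : Int) (r : Int), Dom_divisibility_failures_py n q r → Pre_divisibility_failures_py n q r → Spec_divisibility_failures_py n q r (divisibility_failures_py n q r)

-- ===== LEMMAS AND PROOFS =====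

-- the (≤ 1 element) contribution of index i to the failure list, in terms of the binomials
def pvFail (n : Int) (q : Int) (r : Int) (i : Int) : List (List (String × Int)) :=
  let num := pvIntComb (n - i) (r - i)
  let den := pvIntComb (q - i) (r - i)
  let rem := PySem.Int.mod num den
  if rem ≠ 0 then
    [[("s", i), ("i", i), ("numerator", num), ("denominator", den), ("remainder", rem)]]
  else []

-- A is the concatenation of the per-index contributions, in ascending index order
lemma pvA_eq_flatMap (n q r : Int) :
    divisibility_failures_py n q r = (PySem.List.pyRange 0 r 1).flatMap (pvFail n q r) := by
  unfold divisibility_failures_py pvChecks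
  rw [PySem.List.foldl_append_singleton_eq_map]
  have hstep : (fun (failures : List (List (String × Int))) check =>
      if PySem.Dict.getD check "remainder" none ≠ some 0 then
        failures ++ [[("s", pvField check "i"), ("i", pvField check "i"),
          ("numerator", pvField check "numerator"), ("denominator", pvField check "denominator"),
          ("remainder", pvField check "remainder")]]
      else failures) = (fun failures check =>
      failures ++ (if PySem.Dict.getD check "remainder" none ≠ some 0 then
        [[("s", pvField check "i"), ("i", pvField check "i"),
          ("numerator", pvField check "numerator"), ("denominator", pvField check "denominator"),
          ("remainder", pvField check "remainder")]] else [])) := by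
    funext failures check; split <;> simp
  rw [hstep, PySem.List.foldl_append_eq_flatMap]
  simp only [List.nil_append]
  rw [List.flatMap_map]
  have hpt : ∀ i : Int, (if PySem.Dict.getD (PySem.Dict.mk [("i", some i),
        ("numerator", some (pvIntComb (n - i) (r - i))),
        ("denominator", some (pvIntComb (q - i) (r - i))),
        ("remainder", some (PySem.Int.mod (pvIntComb (n - i) (r - i)) (pvIntComb (q - i) (r - i)))),
        ("quotient", if PySem.Int.mod (pvIntComb (n - i) (r - i)) (pvIntComb (q - i) (r - i)) = 0 then
            some (PySem.Int.floordiv (pvIntComb (n - i) (r - i)) (pvIntComb (q - i) (r - i)))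
          else none)]) "remainder" none ≠ some 0 then
      [[("s", pvField (PySem.Dict.mk [("i", some i),
        ("numerator", some (pvIntComb (n - i) (r - i))),
        ("denominator", some (pvIntComb (q - i) (r - i))),
        ("remainder", some (PySem.Int.mod (pvIntComb (n - i) (r - i)) (pvIntComb (q - i) (r - i)))),
        ("quotient", if PySem.Int.mod (pvIntComb (n - i) (r - i)) (pvIntComb (q - i) (r - i)) = 0 then
            some (PySem.Int.floordiv (pvIntComb (n - i) (r - i)) (pvIntComb (q - i) (r - i)))
          else none)]) "i"), ("i", pvField (PySem.Dict.mk [("i", some i),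
        ("numerator", some (pvIntComb (n - i) (r - i))),
        ("denominator", some (pvIntComb (q - i) (r - i))),
        ("remainder", some (PySem.Int.mod (pvIntComb (n - i) (r - i)) (pvIntComb (q - i) (r - i)))),
        ("quotient", if PySem.Int.mod (pvIntComb (n - i) (r - i)) (pvIntComb (q - i) (r - i)) = 0 then
            some (PySem.Int.floordiv (pvIntComb (n - i) (r - i)) (pvIntComb (q - i) (r - i)))
          else none)]) "i"), ("numerator", pvField (PySem.Dict.mk [("i", some i),
        ("numerator", some (pvIntComb (n - i) (r - i))),
        ("denominator", some (pvIntComb (q - i) (r - i))),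
        ("remainder", some (PySem.Int.mod (pvIntComb (n - i) (r - i)) (pvIntComb (q - i) (r - i)))),
        ("quotient", if PySem.Int.mod (pvIntComb (n - i) (r - i)) (pvIntComb (q - i) (r - i)) = 0 then
            some (PySem.Int.floordiv (pvIntComb (n - i) (r - i)) (pvIntComb (q - i) (r - i)))
          else none)]) "numerator"), ("denominator", pvField (PySem.Dict.mk [("i", some i),
        ("numerator", some (pvIntComb (n - i) (r - i))),
        ("denominator", some (pvIntComb (q - i) (r - i))),
        ("remainder", some (PySem.Int.mod (pvIntComb (n - i) (r - i)) (pvIntComb (q - i) (r - i)))),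
        ("quotient", if PySem.Int.mod (pvIntComb (n - i) (r - i)) (pvIntComb (q - i) (r - i)) = 0 then
            some (PySem.Int.floordiv (pvIntComb (n - i) (r - i)) (pvIntComb (q - i) (r - i)))
          else none)]) "denominator"), ("remainder", pvField (PySem.Dict.mk [("i", some i),
        ("numerator", some (pvIntComb (n - i) (r - i))),
        ("denominator", some (pvIntComb (q - i) (r - i))),
        ("remainder", some (PySem.Int.mod (pvIntComb (n - i) (r - i)) (pvIntComb (q - i) (r - i)))),
        ("quotient", if PySem.Int.mod (pvIntComb (n - i) (r - i)) (pvIntComb (q - i) (r - i)) = 0 then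
            some (PySem.Int.floordiv (pvIntComb (n - i) (r - i)) (pvIntComb (q - i) (r - i)))
          else none)]) "remainder")]]
      else []) = pvFail n q r i := by
    intro i
    simp [pvField, pvFail, PySem.Dict.getD, PySem.Dict.get?_mk_cons]
  exact List.flatMap_congr (fun i _ => hpt i)

-- the exact-ratio update step of B: C(x-t, r-t) from C(x-(t+1), r-(t+1))
lemma pv_comb_step (x r t : Int) (hx : r - 1 ≤ x) (htr : t < r) :
    PySem.Int.floordiv (pvIntComb (x - (t + 1)) (r - (t + 1)) * (x - t)) (r - t)
      = pvIntComb (x - t) (r - t) := by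
  rcases lt_or_ge (t + 1) r with h | h
  · obtain ⟨a, ha⟩ : ∃ a : ℕ, x - (t + 1) = (a : Int) := ⟨(x - (t+1)).toNat, by omega⟩
    obtain ⟨k, hk⟩ : ∃ k : ℕ, r - (t + 1) = (k : Int) := ⟨(r - (t+1)).toNat, by omega⟩
    have hxt : x - t = ((a + 1 : ℕ) : Int) := by push_cast; omega
    have hrt : r - t = ((k + 1 : ℕ) : Int) := by push_cast; omega
    have hcomb : pvIntComb (x - (t+1)) (r - (t+1)) = (a.choose k : Int) := by
      simp [pvIntComb, ha, hk]
    have hid : (a + 1) * a.choose k = (a + 1).choose (k + 1) * (k + 1) :=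
      Nat.add_one_mul_choose_eq a k
    have hmul : pvIntComb (x - (t+1)) (r - (t+1)) * (x - t)
        = ((a + 1).choose (k + 1) : Int) * ((k + 1 : ℕ) : Int) := by
      rw [hcomb, hxt]; push_cast; push_cast at hid; linarith [hid]
    rw [hmul, hrt, PySem.Int.floordiv_eq_ediv_of_pos (by positivity),
        Int.mul_ediv_cancel _ (by positivity)]
    simp [pvIntComb, hxt]
  · have hr : r - t = 1 := by omega
    have h0 : r - (t + 1) = 0 := by omega
    have hx0 : 0 ≤ x - t := by omega
    rw [hr, h0]
    simp [pvIntComb, Nat.choose_one_right, Int.toNat_of_nonneg hx0]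

-- loop invariant of B's descending fold: after the indices r-1 … t have been processed,
-- the state holds C(n-t, r-t), C(q-t, r-t) and the failures for those indices
lemma pvB_fold (n q r : Int) (hn : r - 1 ≤ n) (hq : r ≤ q) :
    ∀ (d : ℕ) (t : Int), t = r - d → 0 ≤ t →
      ((PySem.List.pyRange t r 1).reverse).foldl (pvStepB n q r) (1, 1, [])
        = (pvIntComb (n - t) (r - t), pvIntComb (q - t) (r - t),
           ((PySem.List.pyRange t r 1).reverse).flatMap (pvFail n q r)) := by
  intro d
  induction d with
  | zero =>
    intro t ht ht0
    have : t = r := by omega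
    subst this
    rw [PySem.List.pyRange_one]
    simp [pvIntComb]
  | succ d ih =>
    intro t ht ht0
    have htr : t < r := by omega
    rw [PySem.List.pyRange_one_cons htr, List.reverse_cons, List.foldl_append,
        List.flatMap_append, ih (t + 1) (by omega) (by omega)]
    have h1 := pv_comb_step n r t hn htr
    have h2 := pv_comb_step q r t (by omega) htr
    simp only [List.foldl_cons, List.foldl_nil, List.flatMap_cons, List.flatMap_nil,
      List.append_nil, pvStepB, pvFail, h1, h2]
    split <;> simp

-- each pvFail piece has at most one element, so reversing a piece is the identity
lemma pv_rev_flatMap {α β : Type} (f : α → List β) (hf : ∀ x, (f x).reverse = f x)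
    (l : List α) : ((l.reverse).flatMap f).reverse = l.flatMap f := by
  induction l with
  | nil => simp
  | cons x xs ih => simp [List.flatMap_append, hf, ih]

-- ===== VERDICT (by name: the statement is the Claim_ definition above) =====
theorem divisibility_failures_py_spec : Claim_equal_divisibility_failures_py := by
  intro n q r _ hpre
  unfold Spec_divisibility_failures_py
  rcases lt_or_ge 0 r with hpos | hr
  · obtain ⟨hn, hq⟩ : r - 1 ≤ n ∧ r ≤ q := by
      rcases hpre with h | h
      · omega
      · exact h
    have h := pvB_fold n q r hn hq r.toNat 0 (by omega) le_rfl
    have hf : ∀ i, (pvFail n q r i).reverse = pvFail n q r i := by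
      intro i
      simp only [pvFail]
      split <;> rfl
    rw [pvA_eq_flatMap]
    unfold divisibility_failures_py_alt
    rw [h]
    exact (pv_rev_flatMap (pvFail n q r) hf (PySem.List.pyRange 0 r 1)).symm
  · have hrange : PySem.List.pyRange 0 r 1 = [] := by
      rw [PySem.List.pyRange_one]
      have h0 : (r - 0).toNat = 0 := by omega
      rw [h0]
      rfl
    rw [pvA_eq_flatMap]
    unfold divisibility_failures_py_alt
    rw [hrange]
    rfl
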